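-- pv_equiv track=rewrite | github.com/slem050/FinalProject | TestingScripts.py | GetFirstNumbersFromCode
-- ===== SOURCE A (Python) =====
-- def GetFirstNumbersFromCode(code):
--     numbers = ""
--     for x in code:
--         if x.isdigit():
--             numbers = numbers + x
--         elif x == '.':
--             break
--     return numbers
-- ===== SOURCE B (Python) =====
-- def GetFirstNumbersFromCode(code):
--     head = code.split('.', 1)[0]
--     return ''.join(c for c in head if c.isdigit())
-- ===== Notes on version B (the rewrite author's own statement) =====
-- stated objective: simpler
-- what changed: Replaces the scan-and-break accumulator loop with two phases: split off the substring before the first dot with split('.', 1)[0], then filter its digit characters with a join over a generator.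
import Mathlib
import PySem

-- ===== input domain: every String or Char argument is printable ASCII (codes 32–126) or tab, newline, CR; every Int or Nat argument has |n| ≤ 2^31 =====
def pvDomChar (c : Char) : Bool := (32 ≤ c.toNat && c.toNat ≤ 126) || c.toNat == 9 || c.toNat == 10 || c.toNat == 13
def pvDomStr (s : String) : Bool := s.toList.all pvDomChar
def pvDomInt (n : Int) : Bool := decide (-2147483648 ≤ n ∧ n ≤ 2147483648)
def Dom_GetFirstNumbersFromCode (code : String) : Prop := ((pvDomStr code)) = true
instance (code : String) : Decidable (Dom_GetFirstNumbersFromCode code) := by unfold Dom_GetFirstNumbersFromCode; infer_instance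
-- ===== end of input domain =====

-- B computes the same result in two phases (split before the first dot, then filter digits)
-- instead of A's single scan-and-break accumulator loop; equal cost, simpler decomposition.

-- ===== PORT A =====
-- A's for-loop with break, as structural recursion over the characters with the 'numbers' accumulator.
def pvLoopA : List Char → List Char → List Char
  | [], numbers => numbers
  | x :: rest, numbers =>
    if PySem.Chars.isdigit x then pvLoopA rest (numbers ++ [x])
    else if x = '.' then numbers
    else pvLoopA rest numbers

def GetFirstNumbersFromCode (code : String) : String :=
  String.ofList (pvLoopA code.toList [])

-- ===== PORT B =====
def GetFirstNumbersFromCode_alt (code : String) : String :=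
  match PySem.Str.splitMax? code "." 1 with
  | none => ""  -- unreachable: the separator "." is nonempty
  | some parts =>
    match PySem.List.pyGet? parts 0 with
    | none => ""  -- unreachable: split always returns a nonempty list
    | some head => String.ofList (head.toList.filter PySem.Chars.isdigit)

-- ===== PRECONDITION & SPEC =====
def Spec_GetFirstNumbersFromCode (code : String) (out : String) : Prop := out = GetFirstNumbersFromCode_alt code
instance (code : String) (out : String) : Decidable (Spec_GetFirstNumbersFromCode code out) := by unfold Spec_GetFirstNumbersFromCode; infer_instance

-- ===== CLAIM (what is proved, stated in full; the proofs are below) =====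
def Claim_equal_GetFirstNumbersFromCode : Prop := ∀ (code : String), Dom_GetFirstNumbersFromCode code → Spec_GetFirstNumbersFromCode code (GetFirstNumbersFromCode code)

-- ===== LEMMAS AND PROOFS =====

-- ===== VERDICT (by name: the statement is the Claim_ definition above) =====
-- A's loop collects exactly the digits of the prefix before the first '.'.
lemma pvLoopA_eq (cs acc : List Char) :
    pvLoopA cs acc = acc ++ (cs.takeWhile (· ≠ '.')).filter PySem.Chars.isdigit := by
  induction cs generalizing acc with
  | nil => simp [pvLoopA]
  | cons c rest ih =>
    by_cases hd : PySem.Chars.isdigit c = true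
    · have hdot : c ≠ '.' := by
        intro h; subst h; simp [PySem.Chars.isdigit] at hd
      simp [pvLoopA, hd, hdot, ih]
    · by_cases hdot : c = '.'
      · subst hdot; simp [pvLoopA, hd]
      · simp [pvLoopA, hd, hdot, ih]

-- The first piece of split('.', 1) is the prefix before the first '.'.
lemma pvGo_head (l cur : List Char) (fuel : Nat) (h : l.length ≤ fuel) :
    (PySem.Chars.splitOnMax.go ['.'] fuel 1 l cur []).head? =
      some (cur.reverse ++ l.takeWhile (· ≠ '.')) := by
  induction fuel generalizing l cur with
  | zero =>
    have hl : l = [] := by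
      cases l with
      | nil => rfl
      | cons a t => simp at h
    subst hl
    rw [PySem.Chars.splitOnMax.go.eq_def]
    simp
  | succ f ih =>
    cases l with
    | nil =>
      rw [PySem.Chars.splitOnMax.go.eq_def]
      simp
    | cons c rest =>
      by_cases hc : c = '.'
      · subst hc
        rw [PySem.Chars.splitOnMax.go.eq_def]
        simp only [List.isPrefixOf, Bool.and_eq_true, beq_iff_eq]
        rw [PySem.Chars.splitOnMax.go.eq_def]
        cases f <;> cases rest <;> simp
      · have hpre : List.isPrefixOf ['.'] (c :: rest) = false := by
          simp [List.isPrefixOf]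
          exact fun h => hc h.symm
        have hrest : rest.length ≤ f := by simpa using h
        rw [PySem.Chars.splitOnMax.go.eq_def]
        simp [hpre, hc, ih rest (c :: cur) hrest]

lemma pvSplit_head (cs : List Char) :
    (PySem.Chars.splitOnMax cs ['.'] 1).head? = some (cs.takeWhile (· ≠ '.')) := by
  have := pvGo_head cs [] (cs.length + 1) (by omega)
  simpa [PySem.Chars.splitOnMax] using this

theorem GetFirstNumbersFromCode_spec : Claim_equal_GetFirstNumbersFromCode := by
  intro code _
  unfold Spec_GetFirstNumbersFromCode GetFirstNumbersFromCode GetFirstNumbersFromCode_alt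
  obtain ⟨t, ht⟩ : ∃ t, PySem.Chars.splitOnMax code.toList ['.'] 1 =
      (code.toList.takeWhile (· ≠ '.')) :: t := by
    have h := pvSplit_head code.toList
    cases hp : PySem.Chars.splitOnMax code.toList ['.'] 1 with
    | nil => rw [hp] at h; simp at h
    | cons a t => rw [hp] at h; simp at h; exact ⟨t, by simp [h]⟩
  simp [PySem.Str.splitMax?, PySem.Chars.splitMax?, ht, PySem.List.pyGet?,
    PySem.List.pyIdx?, pvLoopA_eq]
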